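-- pv_equiv track=rewrite | github.com/JustinHoyt/interview-practice | miscellaneous/generate_phrases.py | generate_phrases
-- ===== SOURCE A (Python) =====
-- def add_to_trie(word, idx, trie):
--     is_valid_prefix = True
--     while is_valid_prefix and idx < len(word):
--         if word[idx] in trie:
--             trie = trie[word[idx]]
--         else:
--             trie[word[idx]] = {}
--             is_valid_prefix = False
--         idx += 1
--
--     return idx
--
-- def generate_phrases(word):
--     trie = {}
--     phrases = []
--
--     i = 0
--     while i < len(word):
--         end_idx = add_to_trie(word, i, trie)
--         phrases.append(word[i:end_idx])
--         i = end_idx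
--
--     return phrases
-- ===== SOURCE B (Python) =====
-- def generate_phrases(word):
--     seen = set()
--     phrases = []
--     i = 0
--     n = len(word)
--     while i < n:
--         j = i
--         cur = ''
--         while j < n:
--             cur += word[j]
--             j += 1
--             if cur not in seen:
--                 seen.add(cur)
--                 break
--         phrases.append(word[i:j])
--         i = j
--     return phrases
-- ===== Notes on version B (the rewrite author's own statement) =====
-- stated objective: alternative
-- what changed: Replaces the shared-prefix nested-dict trie (char-by-char node descent with in-place node insertion) by a flat set of already-emitted substrings: the inner loop grows the cumulative substring and tests whole-string set membership, adding one string per phrase.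
import Mathlib
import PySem

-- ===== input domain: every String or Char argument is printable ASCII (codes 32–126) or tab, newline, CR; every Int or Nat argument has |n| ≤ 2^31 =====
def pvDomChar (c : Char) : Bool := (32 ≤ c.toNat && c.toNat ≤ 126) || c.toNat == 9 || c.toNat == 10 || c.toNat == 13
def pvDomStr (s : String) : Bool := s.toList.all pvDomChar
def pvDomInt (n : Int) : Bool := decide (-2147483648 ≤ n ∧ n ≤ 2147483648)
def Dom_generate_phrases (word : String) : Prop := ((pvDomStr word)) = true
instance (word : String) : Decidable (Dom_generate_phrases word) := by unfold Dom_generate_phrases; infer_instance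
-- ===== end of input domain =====

-- B replaces A's nested-dict trie by a flat set of already-emitted substrings (same LZ78 parse, alternative data structure).

-- ===== PORT A =====
-- The nested Python dict-of-dicts trie, in first-child/next-sibling encoding:
-- 'nil' is the empty dict {}, 'cons c t rest' a dict whose first key (insertion order) is c with value t.
inductive Trie where
  | nil : Trie
  | cons : Char → Trie → Trie → Trie
deriving DecidableEq, Repr

-- 'word[idx] in trie' / 'trie[word[idx]]': first (unique) matching key
def Trie.find? : Trie → Char → Option Trie
  | .nil, _ => none
  | .cons d t rest, c => if d = c then some t else rest.find? c

-- 'trie[word[idx]] = {}' when the key is absent: Python appends the new key last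
def Trie.insertNew : Trie → Char → Trie
  | .nil, c => .cons c .nil .nil
  | .cons d t rest, c => .cons d t (rest.insertNew c)

-- functional counterpart of Python's in-place mutation of the child dict (key present)
def Trie.update : Trie → Char → Trie → Trie
  | .nil, _, _ => .nil
  | .cons d t rest, c, nt => if d = c then .cons d nt rest else .cons d t (rest.update c nt)

-- A's add_to_trie: descend while the char is a key; otherwise insert {} and stop; returns (idx, updated trie).
-- Structural fuel recursion; the while loop advances idx by exactly 1, so fuel = w.length - idx never runs out.
def addToTrieF (w : List Char) : Nat → Nat → Trie → Nat × Trie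
  | 0, idx, t => (idx, t)
  | fuel + 1, idx, t =>
    if h : idx < w.length then
      match t.find? w[idx] with
      | some child =>
          ((addToTrieF w fuel (idx + 1) child).1,
           t.update w[idx] (addToTrieF w fuel (idx + 1) child).2)
      | none => (idx + 1, t.insertNew w[idx])
    else (idx, t)

def addToTrie (w : List Char) (idx : Nat) (t : Trie) : Nat × Trie :=
  addToTrieF w (w.length - idx) idx t

-- A's outer while loop (fuel = remaining length; end_idx > i each round, so fuel suffices);
-- word[i:end_idx] with 0 ≤ i ≤ end_idx ≤ len is exactly (drop i).take (end-i)
def gpLoopAF (w : List Char) : Nat → Nat → Trie → List String → List String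
  | 0, _, _, acc => acc
  | fuel + 1, i, t, acc =>
    if h : i < w.length then
      gpLoopAF w fuel (addToTrie w i t).1 (addToTrie w i t).2
        (acc ++ [String.mk ((w.drop i).take ((addToTrie w i t).1 - i))])
    else acc

def generate_phrases (word : String) : List String :=
  gpLoopAF word.toList word.toList.length 0 Trie.nil []

-- ===== PORT B =====
-- B's inner loop: grow cur char by char until it is not yet in seen; returns (j, updated seen).
-- Structural fuel recursion; the loop advances j by exactly 1, so fuel = w.length - j never runs out.
def scanBF (w : List Char) : Nat → Nat → List Char → List (List Char) → Nat × List (List Char)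
  | 0, j, _, seen => (j, seen)
  | fuel + 1, j, cur, seen =>
    if h : j < w.length then
      if cur ++ [w[j]] ∈ seen then scanBF w fuel (j + 1) (cur ++ [w[j]]) seen
      else (j + 1, PySem.Set.add seen (cur ++ [w[j]]))
    else (j, seen)

def scanB (w : List Char) (j : Nat) (cur : List Char) (seen : List (List Char)) :
    Nat × List (List Char) :=
  scanBF w (w.length - j) j cur seen

-- B's outer while loop (fuel = remaining length; j > i each round, so fuel suffices)
def gpLoopBF (w : List Char) : Nat → Nat → List (List Char) → List String → List String
  | 0, _, _, acc => acc
  | fuel + 1, i, seen, acc =>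
    if h : i < w.length then
      gpLoopBF w fuel (scanB w i [] seen).1 (scanB w i [] seen).2
        (acc ++ [String.mk ((w.drop i).take ((scanB w i [] seen).1 - i))])
    else acc

def generate_phrases_alt (word : String) : List String :=
  gpLoopBF word.toList word.toList.length 0 [] []

-- ===== PRECONDITION & SPEC =====
def Spec_generate_phrases (word : String) (out : List String) : Prop := out = generate_phrases_alt word
instance (word : String) (out : List String) : Decidable (Spec_generate_phrases word out) := by unfold Spec_generate_phrases; infer_instance

-- ===== CLAIM (what is proved, stated in full; the proofs are below) =====
def Claim_equal_generate_phrases : Prop := ∀ (word : String), Dom_generate_phrases word → Spec_generate_phrases word (generate_phrases word)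

-- ===== LEMMAS AND PROOFS =====

-- the string s is a root path of the trie
def Trie.hasPath : Trie → List Char → Bool
  | _, [] => true
  | t, c :: cs =>
    match t.find? c with
    | some u => u.hasPath cs
    | none => false

lemma find?_update_of_mem (t : Trie) (c : Char) (nt : Trie)
    (hc : (t.find? c).isSome) (d : Char) :
    (t.update c nt).find? d = if d = c then some nt else t.find? d := by
  induction t with
  | nil => simp [Trie.find?] at hc
  | cons e u rest ihu ihrest =>
    by_cases hec : e = c
    · by_cases hcd : c = d
      · simp [Trie.update, Trie.find?, hec, hcd]
      · have hdc : ¬ d = c := fun h => hcd h.symm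
        have hed : ¬ e = d := by rw [hec]; exact hcd
        simp [Trie.update, Trie.find?, hec, hcd, hdc, hed]
    · simp only [Trie.update, if_neg hec, Trie.find?]
      by_cases hed : e = d
      · have hdc : ¬ d = c := by rw [← hed]; exact hec
        simp [hed, hdc]
      · simp only [if_neg hed]
        exact ihrest (by simpa [Trie.find?, hec] using hc)

lemma find?_insertNew_of_none (t : Trie) (c : Char) (hc : t.find? c = none) (d : Char) :
    (t.insertNew c).find? d = if d = c then some Trie.nil else t.find? d := by
  induction t with
  | nil =>
    simp only [Trie.insertNew, Trie.find?]
    by_cases h : c = d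
    · simp [h]
    · have hdc : ¬ d = c := fun h' => h h'.symm
      simp [h, hdc]
  | cons e u rest ihu ihrest =>
    simp only [Trie.find?] at hc
    by_cases hec : e = c
    · simp [hec] at hc
    · simp only [Trie.insertNew, Trie.find?]
      by_cases hed : e = d
      · have hdc : ¬ d = c := by rw [← hed]; exact hec
        simp [hed, hdc]
      · simp only [if_neg hed]
        exact ihrest (by simpa [hec] using hc)

-- simultaneous simulation of A's add_to_trie descent and B's inner scan
lemma inner_sim (w : List Char) : ∀ (fuel j : Nat) (t : Trie) (cur : List Char)
    (seen : List (List Char)),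
    (∀ s : List Char, s ≠ [] → (t.hasPath s = true ↔ cur ++ s ∈ seen)) →
    (addToTrieF w fuel j t).1 = (scanBF w fuel j cur seen).1 ∧
    (∀ x ∈ seen, x ∈ (scanBF w fuel j cur seen).2) ∧
    (∀ x ∈ (scanBF w fuel j cur seen).2, x ∈ seen ∨
        (j < w.length ∧ ∃ rest, x = cur ++ w[j]! :: rest)) ∧
    (∀ s : List Char, s ≠ [] →
        ((addToTrieF w fuel j t).2.hasPath s = true ↔ cur ++ s ∈ (scanBF w fuel j cur seen).2)) := by
  intro fuel
  induction fuel with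
  | zero =>
    intro j t cur seen hrel
    exact ⟨rfl, fun x hx => hx, fun x hx => Or.inl hx, hrel⟩
  | succ n ih =>
    intro j t cur seen hrel
    by_cases hj : j < w.length
    · have hgetbang : w[j]! = w[j] := getElem!_pos w j hj
      simp only [addToTrieF, scanBF, dif_pos hj]
      cases hfind : t.find? w[j] with
      | some child =>
        -- A descends; B's cur' is already in seen
        have hmem : cur ++ [w[j]] ∈ seen := by
          have := (hrel [w[j]] (by simp)).mp (by simp [Trie.hasPath, hfind])
          exact this
        simp only [if_pos hmem]
        have hrel' : ∀ s : List Char, s ≠ [] →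
            (child.hasPath s = true ↔ (cur ++ [w[j]]) ++ s ∈ seen) := by
          intro s hs
          have := hrel (w[j] :: s) (by simp)
          simpa [Trie.hasPath, hfind, List.append_assoc] using this
        obtain ⟨heq, hmono, hnew, hrelr⟩ := ih (j + 1) child (cur ++ [w[j]]) seen hrel'
        refine ⟨heq, hmono, ?_, ?_⟩
        · intro x hx
          rcases hnew x hx with hx' | ⟨hjl, rest, hrest⟩
          · exact Or.inl hx'
          · exact Or.inr ⟨hj, w[j + 1]! :: rest, by simp [hrest, hgetbang]⟩
        · -- updated trie's paths vs final seen
          intro s hs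
          have hsome : (t.find? w[j]).isSome := by simp [hfind]
          cases s with
          | nil => exact absurd rfl hs
          | cons d rest =>
            by_cases hdc : d = w[j]
            · subst hdc
              cases rest with
              | nil =>
                -- path [d] exists after update; cur ++ [d] already ∈ seen, preserved
                simp only [Trie.hasPath, find?_update_of_mem t _ _ hsome, if_pos rfl]
                exact ⟨fun _ => hmono _ hmem, fun _ => rfl⟩
              | cons e rest' =>
                have := hrelr (e :: rest') (by simp)
                simpa [Trie.hasPath, find?_update_of_mem t _ _ hsome, if_pos rfl,
                  List.append_assoc] using this
            · -- other branch unchanged; final seen adds only extensions of cur ++ [w[j]]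
              simp only [Trie.hasPath, find?_update_of_mem t _ _ hsome, if_neg hdc]
              have hold := hrel (d :: rest) (by simp)
              simp only [Trie.hasPath] at hold
              constructor
              · intro hpath
                exact hmono _ (hold.mp hpath)
              · intro hfin
                rcases hnew _ hfin with hmem' | ⟨hjl, rest2, hrest2⟩
                · exact hold.mpr hmem'
                · exfalso
                  have h2 : cur ++ d :: rest = cur ++ ([w[j]] ++ w[j + 1]! :: rest2) := by
                    rw [hrest2, List.append_assoc]
                  have h3 := List.append_cancel_left h2
                  exact hdc (by injection h3)
      | none =>
        -- A inserts and stops; B's cur' is not in seen, adds it and stops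
        have hnmem : cur ++ [w[j]] ∉ seen := by
          intro hmem
          have := (hrel [w[j]] (by simp)).mpr hmem
          simp [Trie.hasPath, hfind] at this
        simp only [if_neg hnmem]
        refine ⟨by simp, ?_, ?_, ?_⟩
        · intro x hx; exact (PySem.Set.mem_add _ _ _).mpr (Or.inl hx)
        · intro x hx
          rcases (PySem.Set.mem_add _ _ _).mp hx with hx' | rfl
          · exact Or.inl hx'
          · exact Or.inr ⟨hj, [], by simp [hgetbang]⟩
        · intro s hs
          cases s with
          | nil => exact absurd rfl hs
          | cons d rest =>
            by_cases hdc : d = w[j]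
            · subst hdc
              cases rest with
              | nil =>
                simp only [Trie.hasPath, find?_insertNew_of_none t _ hfind, if_pos rfl]
                exact ⟨fun _ => (PySem.Set.mem_add _ _ _).mpr (Or.inr rfl), fun _ => rfl⟩
              | cons e rest' =>
                simp only [Trie.hasPath, find?_insertNew_of_none t _ hfind, if_pos rfl]
                constructor
                · intro h; simp [Trie.hasPath, Trie.find?] at h
                · intro hfin
                  exfalso
                  rcases (PySem.Set.mem_add _ _ _).mp hfin with hmem' | heq'
                  · have := (hrel (w[j] :: e :: rest') (by simp)).mpr hmem'
                    simp [Trie.hasPath, hfind] at this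
                  · have h3 : (w[j] : Char) :: e :: rest' = [w[j]] := List.append_cancel_left heq'
                    simp at h3
            · simp only [Trie.hasPath, find?_insertNew_of_none t _ hfind, if_neg hdc]
              have hold := hrel (d :: rest) (by simp)
              simp only [Trie.hasPath] at hold
              constructor
              · intro hpath; exact (PySem.Set.mem_add _ _ _).mpr (Or.inl (hold.mp hpath))
              · intro hfin
                rcases (PySem.Set.mem_add _ _ _).mp hfin with hmem' | heq'
                · exact hold.mpr hmem'
                · exfalso
                  have : (d : Char) :: rest = [w[j]] := List.append_cancel_left heq'
                  exact hdc (by injection this)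
    · simp only [addToTrieF, scanBF, dif_neg hj]
      exact ⟨by simp, fun x hx => hx, fun x hx => Or.inl hx, hrel⟩

lemma outer_sim (w : List Char) : ∀ (fuel i : Nat) (t : Trie) (seen : List (List Char))
    (acc : List String),
    (∀ s : List Char, s ≠ [] → (t.hasPath s = true ↔ s ∈ seen)) →
    gpLoopAF w fuel i t acc = gpLoopBF w fuel i seen acc := by
  intro fuel
  induction fuel with
  | zero =>
    intro i t seen acc hrel
    rfl
  | succ n ih =>
    intro i t seen acc hrel
    by_cases hi : i < w.length
    · have hrel' : ∀ s : List Char, s ≠ [] →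
          (t.hasPath s = true ↔ ([] : List Char) ++ s ∈ seen) := by
        simpa using hrel
      obtain ⟨heq, _, _, hrelr⟩ := inner_sim w (w.length - i) i t [] seen hrel'
      simp only [gpLoopAF, gpLoopBF, dif_pos hi]
      unfold addToTrie scanB
      rw [heq]
      refine ih _ (addToTrieF w (w.length - i) i t).2 (scanBF w (w.length - i) i [] seen).2 _ ?_
      simpa using hrelr
    · simp [gpLoopAF, gpLoopBF, dif_neg hi]

-- ===== VERDICT (by name: the statement is the Claim_ definition above) =====
theorem generate_phrases_spec : Claim_equal_generate_phrases := by
  intro word _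
  unfold Spec_generate_phrases generate_phrases generate_phrases_alt
  exact outer_sim word.toList word.toList.length 0 Trie.nil [] []
    (fun s hs => by cases s with
      | nil => exact absurd rfl hs
      | cons c cs => simp [Trie.hasPath, Trie.find?])
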